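-- pv_equiv track=rewrite | github.com/serinaerzengin/NM-AI-2026 | task3-NorgesGruppen/analyze_shelf_colors.py | group_strip_rows
-- ===== SOURCE A (Python) =====
-- def group_strip_rows(strip_rows):
--     """Group consecutive strip rows into individual shelf strips."""
--     if not strip_rows:
--         return []
--     groups = []
--     current_group = [strip_rows[0]]
--     for i in range(1, len(strip_rows)):
--         y_prev = strip_rows[i - 1][0]
--         y_curr = strip_rows[i][0]
--         if y_curr - y_prev <= 3:  # allow small gaps
--             current_group.append(strip_rows[i])
--         else:
--             groups.append(current_group)
--             current_group = [strip_rows[i]]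
--     groups.append(current_group)
--     return groups
-- ===== SOURCE B (Python) =====
-- def group_strip_rows(strip_rows):
--     """Group consecutive strip rows into individual shelf strips.
--
--     Two-pass decomposition: first label every row with an integer group id
--     (incremented at each y-gap > 3), then partition the rows by label into
--     a dict of buckets, returned in label (= insertion) order.
--     """
--     if not strip_rows:
--         return []
--     labels = [0]
--     for prev, curr in zip(strip_rows, strip_rows[1:]):
--         labels.append(labels[-1] + (1 if curr[0] - prev[0] > 3 else 0))
--     buckets = {}
--     for lab, row in zip(labels, strip_rows):
--         buckets.setdefault(lab, []).append(row)
--     return list(buckets.values())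
-- ===== Notes on version B (the rewrite author's own statement) =====
-- stated objective: alternative
-- what changed: The interleaved accumulate/flush loop is replaced by a boundary-detection pass that assigns an integer group label to every row, followed by a key-based partition pass that buckets rows by label in a dict and returns the buckets in label order.
import Mathlib
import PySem

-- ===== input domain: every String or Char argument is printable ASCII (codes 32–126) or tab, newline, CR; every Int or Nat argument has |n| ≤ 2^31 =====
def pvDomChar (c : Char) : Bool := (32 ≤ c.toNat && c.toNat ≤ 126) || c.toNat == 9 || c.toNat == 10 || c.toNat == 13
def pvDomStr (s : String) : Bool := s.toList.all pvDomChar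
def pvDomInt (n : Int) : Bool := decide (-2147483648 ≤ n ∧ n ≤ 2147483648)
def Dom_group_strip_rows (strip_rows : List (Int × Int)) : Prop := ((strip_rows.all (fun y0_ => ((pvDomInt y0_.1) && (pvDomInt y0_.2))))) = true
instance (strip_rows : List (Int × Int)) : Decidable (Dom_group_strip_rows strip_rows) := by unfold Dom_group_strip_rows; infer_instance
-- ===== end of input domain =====

-- B replaces A's accumulate/flush loop by a label pass plus a dict partition pass (objective: alternative).

-- ===== PORT A =====
-- the for-loop over range(1, len): prev = previous row, cur = current_group, groups = groups
def goA (prev : Int × Int) (cur : List (Int × Int)) (groups : List (List (Int × Int))) :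
    List (Int × Int) → List (List (Int × Int))
  | [] => groups ++ [cur]
  | x :: xs =>
    if x.1 - prev.1 ≤ 3 then goA x (cur ++ [x]) groups xs
    else goA x [x] (groups ++ [cur]) xs

def group_strip_rows (strip_rows : List (Int × Int)) : List (List (Int × Int)) :=
  match strip_rows with
  | [] => []
  | h :: t => goA h [h] [] t

-- ===== PORT B =====
-- the labels loop over zip(strip_rows, strip_rows[1:]): l = labels[-1]
def labsB (prev : Int × Int) (l : Int) : List (Int × Int) → List Int
  | [] => []
  | x :: xs =>
    let l' := l + (if x.1 - prev.1 > 3 then 1 else 0)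
    l' :: labsB x l' xs

-- one step of the bucket loop: buckets.setdefault(lab, []).append(row)
def bstep (d : PySem.Dict Int (List (Int × Int))) (p : Int × (Int × Int)) :
    PySem.Dict Int (List (Int × Int)) :=
  d.insert p.1 (d.getD p.1 [] ++ [p.2])

def group_strip_rows_alt (strip_rows : List (Int × Int)) : List (List (Int × Int)) :=
  match strip_rows with
  | [] => []
  | h :: t =>
    (((0 :: labsB h 0 t).zip (h :: t)).foldl bstep PySem.Dict.empty).values

-- ===== PRECONDITION & SPEC =====
def Spec_group_strip_rows (strip_rows : List (Int × Int)) (out : List (List (Int × Int))) : Prop := out = group_strip_rows_alt strip_rows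
instance (strip_rows : List (Int × Int)) (out : List (List (Int × Int))) : Decidable (Spec_group_strip_rows strip_rows out) := by unfold Spec_group_strip_rows; infer_instance

-- ===== CLAIM (what is proved, stated in full; the proofs are below) =====
def Claim_equal_group_strip_rows : Prop := ∀ (strip_rows : List (Int × Int)), Dom_group_strip_rows strip_rows → Spec_group_strip_rows strip_rows (group_strip_rows strip_rows)

-- ===== LEMMAS AND PROOFS =====

-- invariant: the bucket fold over the remaining labelled rows, started from a dict whose
-- entries are the finished groups (keys < l) followed by the open group (key l),
-- produces exactly what A's accumulate/flush loop produces.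
theorem key_lemma :
    ∀ (t : List (Int × Int)) (prev : Int × Int) (l : Int) (cur : List (Int × Int))
      (pre : List (Int × List (Int × Int))),
      (∀ k ∈ pre.map Prod.fst, k < l) → (pre.map Prod.fst).Nodup →
      (((labsB prev l t).zip t).foldl bstep (PySem.Dict.mk (pre ++ [(l, cur)]))).values
        = goA prev cur (pre.map Prod.snd) t := by
  intro t
  induction t with
  | nil =>
    intro prev l cur pre hlt hnd
    simp [labsB, goA, PySem.Dict.values]
  | cons x xs ih =>
    intro prev l cur pre hlt hnd
    have hndl : ((pre ++ [(l, cur)]).map Prod.fst).Nodup := by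
      simp only [List.map_append, List.map, List.nodup_append]
      refine ⟨hnd, List.nodup_singleton _, ?_⟩
      intro a ha b hb
      have := hlt a ha
      simp at hb
      omega
    by_cases hle : x.1 - prev.1 ≤ 3
    · have hlab : labsB prev l (x :: xs) = l :: labsB x l xs := by
        have hn : ¬ (x.1 - prev.1 > 3) := by omega
        simp [labsB, hn]
      have hmem : (l, cur) ∈ (pre ++ [(l, cur)]) := by simp
      have hget : (PySem.Dict.mk (pre ++ [(l, cur)])).getD l [] = cur :=
        PySem.Dict.getD_of_mem_items _ hmem (by simpa [PySem.Dict.keys] using hndl) []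
      have hcont : (PySem.Dict.mk (pre ++ [(l, cur)])).contains l = true := by
        rw [PySem.Dict.contains_eq_decide_mem_keys]
        simp [PySem.Dict.keys]
      have hins : bstep (PySem.Dict.mk (pre ++ [(l, cur)])) (l, x)
          = PySem.Dict.mk (pre ++ [(l, cur ++ [x])]) := by
        apply PySem.Dict.ext
        rw [show bstep (PySem.Dict.mk (pre ++ [(l, cur)])) (l, x)
              = (PySem.Dict.mk (pre ++ [(l, cur)])).insert l
                  ((PySem.Dict.mk (pre ++ [(l, cur)])).getD l [] ++ [x]) from rfl,
            hget, PySem.Dict.items_insert, hcont]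
        simp only [if_true]
        rw [List.map_append]
        congr 1
        · have hid : ∀ p ∈ pre, (fun p => if (p.1 == l) = true then (l, cur ++ [x]) else p) p = id p := by
            intro p hp
            have : p.1 < l := hlt p.1 (List.mem_map_of_mem hp)
            have hne : (p.1 == l) = false := by simp; omega
            simp [hne]
          rw [List.map_congr_left hid, List.map_id]
        · simp
      rw [hlab]
      simp only [List.zip_cons_cons, List.foldl_cons, hins]
      rw [ih x l (cur ++ [x]) pre hlt hnd]
      simp [goA, hle]
    · have hlab : labsB prev l (x :: xs) = (l + 1) :: labsB x (l + 1) xs := by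
        have hn : x.1 - prev.1 > 3 := by omega
        simp [labsB, hn]
      have hmemk : ((l + 1 : Int)) ∉ ((pre ++ [(l, cur)]).map Prod.fst) := by
        intro hm
        rw [List.map_append] at hm
        rcases List.mem_append.mp hm with hm | hm
        · exact absurd (hlt _ hm) (by omega)
        · simp at hm
      have hnc : (PySem.Dict.mk (pre ++ [(l, cur)])).contains (l + 1) = false := by
        rw [PySem.Dict.contains_eq_decide_mem_keys]
        simpa [PySem.Dict.keys] using hmemk
      have hget : (PySem.Dict.mk (pre ++ [(l, cur)])).getD (l + 1) [] = [] :=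
        PySem.Dict.getD_of_not_contains _ [] hnc
      have hins : bstep (PySem.Dict.mk (pre ++ [(l, cur)])) (l + 1, x)
          = PySem.Dict.mk ((pre ++ [(l, cur)]) ++ [(l + 1, [x])]) := by
        apply PySem.Dict.ext
        rw [show bstep (PySem.Dict.mk (pre ++ [(l, cur)])) (l + 1, x)
              = (PySem.Dict.mk (pre ++ [(l, cur)])).insert (l + 1)
                  ((PySem.Dict.mk (pre ++ [(l, cur)])).getD (l + 1) [] ++ [x]) from rfl,
            hget, PySem.Dict.items_insert, hnc]
        simp
      rw [hlab]
      simp only [List.zip_cons_cons, List.foldl_cons, hins]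
      have hlt' : ∀ k ∈ ((pre ++ [(l, cur)]).map Prod.fst), k < l + 1 := by
        intro k hk
        rw [List.map_append] at hk
        rcases List.mem_append.mp hk with hk | hk
        · have := hlt k hk; omega
        · simp at hk; omega
      have hndl : ((pre ++ [(l, cur)]).map Prod.fst).Nodup := by
        simp only [List.map_append, List.map, List.nodup_append]
        refine ⟨hnd, List.nodup_singleton _, ?_⟩
        intro a ha b hb
        have := hlt a ha
        simp at hb
        omega
      rw [ih x (l + 1) [x] (pre ++ [(l, cur)]) hlt' hndl]
      simp [goA, hle]

theorem main_eq (strip_rows : List (Int × Int)) :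
    group_strip_rows strip_rows = group_strip_rows_alt strip_rows := by
  cases strip_rows with
  | nil => rfl
  | cons h t =>
    show goA h [h] [] t = (((0 :: labsB h 0 t).zip (h :: t)).foldl bstep PySem.Dict.empty).values
    have h0 : bstep PySem.Dict.empty (0, h) = PySem.Dict.mk ([] ++ [((0 : Int), [h])]) := by
      apply PySem.Dict.ext
      rw [show bstep PySem.Dict.empty (0, h)
            = (PySem.Dict.empty (κ := Int) (ν := List (Int × Int))).insert 0
                (PySem.Dict.empty.getD 0 [] ++ [h]) from rfl,
          PySem.Dict.getD_empty, PySem.Dict.items_insert, PySem.Dict.contains_empty]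
      simp [PySem.Dict.empty]
    rw [show ((0 :: labsB h 0 t).zip (h :: t)) = ((0 : Int), h) :: ((labsB h 0 t).zip t) from rfl,
        List.foldl_cons, h0,
        key_lemma t h 0 [h] [] (by simp) (by simp)]
    rfl

-- ===== VERDICT (by name: the statement is the Claim_ definition above) =====
theorem group_strip_rows_spec : Claim_equal_group_strip_rows := by
  intro strip_rows _
  unfold Spec_group_strip_rows
  exact main_eq strip_rows
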